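-- pv_equiv track=rewrite | github.com/MaxenceGueyffier/evolucell | quadtree.py | contained
-- ===== SOURCE A (Python) =====
-- def contained(nptup,nparray):
--     """check if the exact particule (or a slightly different) is already in the quadtree"""
--     _set = set((x,y) for [x,y] in nparray)
--     (x,y) = nptup
--     for i in range(-1,2):
--         for j in range(-1,2):
--             if (x+i,y+j) in _set :
--                 return True
--     return False
-- ===== SOURCE B (Python) =====
-- def contained(nptup, nparray):
--     """check if the exact particule (or a slightly different) is already in the quadtree"""
--     (x, y) = nptup
--     for [px, py] in nparray:
--         if px - x in (-1, 0, 1) and py - y in (-1, 0, 1):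
--             return True
--     return False
-- ===== Notes on version B (the rewrite author's own statement) =====
-- stated objective: simpler
-- what changed: B drops the set index and the 9-offset probe loop: one direct pass over nparray testing whether each point's offsets px-x and py-y lie in (-1,0,1), returning on the first neighbour found.
import Mathlib
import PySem

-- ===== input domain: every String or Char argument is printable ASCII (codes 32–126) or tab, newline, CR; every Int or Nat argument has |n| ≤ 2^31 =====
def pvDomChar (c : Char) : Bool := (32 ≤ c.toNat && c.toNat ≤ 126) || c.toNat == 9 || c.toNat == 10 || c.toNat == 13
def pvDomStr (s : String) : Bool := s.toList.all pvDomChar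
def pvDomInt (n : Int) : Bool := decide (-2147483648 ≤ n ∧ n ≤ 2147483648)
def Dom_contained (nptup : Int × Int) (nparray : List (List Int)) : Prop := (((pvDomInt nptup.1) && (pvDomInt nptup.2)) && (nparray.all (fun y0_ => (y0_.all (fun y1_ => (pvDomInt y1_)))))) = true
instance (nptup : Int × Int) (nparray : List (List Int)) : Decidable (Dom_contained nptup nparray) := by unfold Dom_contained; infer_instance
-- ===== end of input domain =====

-- B replaces A's set index + 9 fixed offset probes with one direct pass testing the
-- neighbourhood predicate on each point (objective: simpler).

-- ===== PORT A =====
-- unpacking '[x,y]' of a row; under Pre_ every row has exactly two elements,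
-- so the catch-all branch is never reached (Python raises ValueError there).
def pvUnpack2 (r : List Int) : Int × Int :=
  match r with
  | [a, b] => (a, b)
  | _ => (0, 0)

def contained (nptup : Int × Int) (nparray : List (List Int)) : Bool :=
  let _set : PySem.Set (Int × Int) := PySem.Set.ofList (nparray.map pvUnpack2)
  let x := nptup.1
  let y := nptup.2
  -- 'for i in range(-1,2): for j in range(-1,2): if … return True' / 'return False'
  (PySem.List.pyRange (-1) 2 1).any (fun i =>
    (PySem.List.pyRange (-1) 2 1).any (fun j =>
      PySem.Set.contains _set (x + i, y + j)))

-- ===== PORT B =====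
def contained_alt (nptup : Int × Int) (nparray : List (List Int)) : Bool :=
  let x := nptup.1
  let y := nptup.2
  nparray.any (fun r =>
    match r with
    | [px, py] =>
        (px - x == -1 || px - x == 0 || px - x == 1) &&
        (py - y == -1 || py - y == 0 || py - y == 1)
    | _ => false)   -- unreachable under Pre_ (Python raises ValueError on such a row)

-- ===== PRECONDITION & SPEC =====
-- Pre_ excludes rows that are not two-element lists: on those the '[x,y]' unpacking
-- in A (and in B) raises ValueError, so A returns no value there.
def Pre_contained (nptup : Int × Int) (nparray : List (List Int)) : Prop :=
  ∀ r ∈ nparray, r.length = 2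
instance (nptup : Int × Int) (nparray : List (List Int)) : Decidable (Pre_contained nptup nparray) := by unfold Pre_contained; infer_instance

def pvWitness_contained : (Int × Int) × List (List Int) := ((3, 4), [[1, 2], [4, 4]])

def Spec_contained (nptup : Int × Int) (nparray : List (List Int)) (out : Bool) : Prop := out = contained_alt nptup nparray
instance (nptup : Int × Int) (nparray : List (List Int)) (out : Bool) : Decidable (Spec_contained nptup nparray out) := by unfold Spec_contained; infer_instance

-- ===== CLAIM (what is proved, stated in full; the proofs are below) =====
def Claim_equal_contained : Prop := ∀ (nptup : Int × Int) (nparray : List (List Int)), Dom_contained nptup nparray → Pre_contained nptup nparray → Spec_contained nptup nparray (contained nptup nparray)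

-- ===== LEMMAS AND PROOFS =====

theorem contained_eq_true_iff (x y : Int) (nparray : List (List Int)) :
    contained (x, y) nparray = true ↔
      ∃ i ∈ PySem.List.pyRange (-1) 2 1, ∃ j ∈ PySem.List.pyRange (-1) 2 1,
        (x + i, y + j) ∈ nparray.map pvUnpack2 := by
  simp [contained, PySem.Set.contains, PySem.Set.mem_ofList]

theorem contained_alt_eq_true_iff (x y : Int) (nparray : List (List Int)) :
    contained_alt (x, y) nparray = true ↔
      ∃ r ∈ nparray, ∃ px py : Int, r = [px, py] ∧
        (px - x = -1 ∨ px - x = 0 ∨ px - x = 1) ∧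
        (py - y = -1 ∨ py - y = 0 ∨ py - y = 1) := by
  simp only [contained_alt, List.any_eq_true]
  constructor
  · rintro ⟨r, hr, hb⟩
    refine ⟨r, hr, ?_⟩
    match r with
    | [px, py] =>
      simp only [Bool.and_eq_true, Bool.or_eq_true, beq_iff_eq] at hb
      exact ⟨px, py, rfl, by tauto, by tauto⟩
    | [] => simp at hb
    | [_] => simp at hb
    | _ :: _ :: _ :: _ => simp at hb
  · rintro ⟨r, hr, px, py, rfl, h1, h2⟩
    exact ⟨_, hr, by simp only [Bool.and_eq_true, Bool.or_eq_true, beq_iff_eq]; tauto⟩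

theorem contained_spec_aux (x y : Int) (nparray : List (List Int))
    (hpre : Pre_contained (x, y) nparray) :
    contained (x, y) nparray = contained_alt (x, y) nparray := by
  rw [Bool.eq_iff_iff, contained_eq_true_iff, contained_alt_eq_true_iff]
  rw [show PySem.List.pyRange (-1) 2 1 = [-1, 0, 1] from rfl]
  constructor
  · rintro ⟨i, hi, j, hj, hp⟩
    rcases List.mem_map.1 hp with ⟨r, hr, hur⟩
    refine ⟨r, hr, ?_⟩
    have hlen := hpre r hr
    match r with
    | [px, py] =>
      simp only [pvUnpack2, Prod.mk.injEq] at hur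
      simp only [List.mem_cons, List.not_mem_nil, or_false] at hi hj
      refine ⟨px, py, rfl, by omega, by omega⟩
  · rintro ⟨r, hr, px, py, rfl, h1, h2⟩
    refine ⟨px - x, by simp; omega, py - y, by simp; omega, ?_⟩
    refine List.mem_map.2 ⟨[px, py], hr, ?_⟩
    simp only [pvUnpack2, Prod.mk.injEq]; omega

-- ===== VERDICT (by name: the statement is the Claim_ definition above) =====
theorem contained_spec : Claim_equal_contained := by
  intro nptup nparray _ hpre
  obtain ⟨x, y⟩ := nptup
  exact contained_spec_aux x y nparray hpre
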